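-- pv_equiv track=rewrite | github.com/kunchhan/kumora-AI | emotion_intelligence_system/emotion_classifier.py | _calculate_valence
-- ===== SOURCE A (Python) =====
-- from typing import Dict, List, Tuple, Optional
--
-- def _calculate_valence(detected_emotions: List[str],
--                       negative_emotions: List[str],
--                       positive_emotions: List[str]) -> str:
--     """Calculate overall emotional valence"""
--     neg_count = sum(1 for e in detected_emotions if e in negative_emotions)
--     pos_count = sum(1 for e in detected_emotions if e in positive_emotions)
--
--     if neg_count > pos_count:
--         return "negative"
--     elif pos_count > neg_count:
--         return "positive"
--     else:
--         return "mixed"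
-- ===== SOURCE B (Python) =====
-- from typing import List
--
-- def _calculate_valence(detected_emotions: List[str],
--                        negative_emotions: List[str],
--                        positive_emotions: List[str]) -> str:
--     pos_set = set(positive_emotions)
--     neg_set = set(negative_emotions)
--     score = 0
--     for e in dict.fromkeys(detected_emotions):
--         score += detected_emotions.count(e) * ((e in pos_set) - (e in neg_set))
--     if score < 0:
--         return "negative"
--     if score > 0:
--         return "positive"
--     return "mixed"
-- ===== Notes on version B (the rewrite author's own statement) =====
-- stated objective: faster
-- what changed: Instead of A's two full passes that test each detected emotion by linear scans of both polarity lists, B builds hash sets of the polarity lists once and iterates only over the DISTINCT detected emotions (dict.fromkeys), weighting each by its multiplicity (list.count) times a signed O(1) set-membership indicator, then labels by the sign of the single aggregate score.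
import Mathlib
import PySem

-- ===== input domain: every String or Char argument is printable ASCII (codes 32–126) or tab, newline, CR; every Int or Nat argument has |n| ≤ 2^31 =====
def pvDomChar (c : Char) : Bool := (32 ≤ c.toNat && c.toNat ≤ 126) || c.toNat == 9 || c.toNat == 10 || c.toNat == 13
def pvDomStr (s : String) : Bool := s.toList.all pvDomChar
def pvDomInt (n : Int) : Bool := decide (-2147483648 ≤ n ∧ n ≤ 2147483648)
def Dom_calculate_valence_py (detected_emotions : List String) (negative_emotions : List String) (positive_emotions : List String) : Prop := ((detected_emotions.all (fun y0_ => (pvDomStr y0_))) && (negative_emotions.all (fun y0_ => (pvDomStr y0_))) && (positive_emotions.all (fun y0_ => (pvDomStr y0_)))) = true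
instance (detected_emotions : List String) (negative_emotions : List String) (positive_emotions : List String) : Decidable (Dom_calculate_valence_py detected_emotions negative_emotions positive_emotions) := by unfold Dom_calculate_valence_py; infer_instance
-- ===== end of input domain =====

-- B replaces A's two membership-counting passes by a traversal of the distinct detected emotions,
-- each weighted by its multiplicity times a signed set-membership indicator; return-value equivalence.

-- ===== PORT A =====
-- A: two generator sums counting membership in each polarity list, then compare the counts.
def calculate_valence_py (detected_emotions : List String) (negative_emotions : List String) (positive_emotions : List String) : String :=
  let neg_count := detected_emotions.foldl (fun acc e => if negative_emotions.contains e then acc + 1 else acc) (0 : Int)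
  let pos_count := detected_emotions.foldl (fun acc e => if positive_emotions.contains e then acc + 1 else acc) (0 : Int)
  if neg_count > pos_count then "negative"
  else if pos_count > neg_count then "positive"
  else "mixed"

-- ===== PORT B =====
-- B: hash sets of the polarity lists; loop over the distinct detected emotions (dict.fromkeys order),
-- adding multiplicity * (pos-membership - neg-membership); label by the sign of the score.
def calculate_valence_py_alt (detected_emotions : List String) (negative_emotions : List String) (positive_emotions : List String) : String :=
  let pos_set : PySem.Set String := PySem.Set.ofList positive_emotions
  let neg_set : PySem.Set String := PySem.Set.ofList negative_emotions
  let score := (PySem.List.dedup detected_emotions).foldl (fun s e =>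
      s + (PySem.List.count detected_emotions e : Int) *
        ((if PySem.Set.contains pos_set e then (1 : Int) else 0) -
         (if PySem.Set.contains neg_set e then (1 : Int) else 0))) (0 : Int)
  if score < 0 then "negative"
  else if score > 0 then "positive"
  else "mixed"

-- ===== PRECONDITION & SPEC =====
def Spec_calculate_valence_py (detected_emotions : List String) (negative_emotions : List String) (positive_emotions : List String) (out : String) : Prop := out = calculate_valence_py_alt detected_emotions negative_emotions positive_emotions
instance (detected_emotions : List String) (negative_emotions : List String) (positive_emotions : List String) (out : String) : Decidable (Spec_calculate_valence_py detected_emotions negative_emotions positive_emotions out) := by unfold Spec_calculate_valence_py; infer_instance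

-- ===== CLAIM (what is proved, stated in full; the proofs are below) =====
def Claim_equal_calculate_valence_py : Prop := ∀ (detected_emotions : List String) (negative_emotions : List String) (positive_emotions : List String), Dom_calculate_valence_py detected_emotions negative_emotions positive_emotions → Spec_calculate_valence_py detected_emotions negative_emotions positive_emotions (calculate_valence_py detected_emotions negative_emotions positive_emotions)

-- ===== LEMMAS AND PROOFS =====

-- ===== VERDICT (by name: the statement is the Claim_ definition above) =====
-- distinct-elements weighted sum equals the plain sum over the list
theorem pv_dedup_weighted_sum (g : String → Int) (d : List String) :
    ((PySem.List.dedup d).map (fun e => (PySem.List.count d e : Int) * g e)).sum = (d.map g).sum := by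
  have hfin : (PySem.List.dedup d).toFinset = d.toFinset := by
    apply Finset.ext; intro x; simp
  have h1 : ((PySem.List.dedup d).map (fun e => (PySem.List.count d e : Int) * g e)).sum
      = ∑ e ∈ d.toFinset, (List.count e d : Int) * g e := by
    rw [← List.sum_toFinset _ (PySem.List.nodup_dedup d), hfin]
    apply Finset.sum_congr rfl; intro x _; rw [PySem.List.count_eq]
  have h2 : (d.map g).sum = ∑ e ∈ d.toFinset, (List.count e d : Int) * g e := by
    have := Finset.sum_multiset_map_count (d : Multiset String) g
    simp only [Multiset.map_coe, Multiset.sum_coe, List.toFinset_coe, Multiset.coe_count] at this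
    rw [this]
    apply Finset.sum_congr rfl; intro x _
    rw [nsmul_eq_mul]
  rw [h1, h2]

-- 0/1 indicator difference summed over the list is the difference of the two countP's
theorem pv_sub_count (q r : String → Bool) (d : List String) :
    (d.map (fun e => (if q e then (1 : Int) else 0) - (if r e then 1 else 0))).sum
      = (d.countP q : Int) - (d.countP r : Int) := by
  induction d with
  | nil => simp
  | cons x xs ih =>
      simp only [List.map_cons, List.sum_cons, List.countP_cons, ih]
      by_cases hq : q x = true <;> by_cases hr : r x = true <;>
        simp [hq, hr] <;> omega

theorem calculate_valence_py_spec : Claim_equal_calculate_valence_py := by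
  intro d n p _
  unfold Spec_calculate_valence_py calculate_valence_py calculate_valence_py_alt
  simp only [PySem.List.foldl_if_add_one, PySem.List.foldl_add, zero_add]
  rw [pv_dedup_weighted_sum (fun e => ((if (PySem.Set.ofList p).contains e then (1 : Int) else 0) -
        (if (PySem.Set.ofList n).contains e then (1 : Int) else 0))),
      pv_sub_count]
  have hp : d.countP (fun e => (PySem.Set.ofList p).contains e) = d.countP p.contains := by
    apply List.countP_congr; intro x _
    simp [PySem.Set.mem_ofList]
  have hn : d.countP (fun e => (PySem.Set.ofList n).contains e) = d.countP n.contains := by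
    apply List.countP_congr; intro x _
    simp [PySem.Set.mem_ofList]
  rw [hp, hn]
  have h1 : (0 : Int) ≤ (d.countP n.contains : Int) := by positivity
  have h2 : (0 : Int) ≤ (d.countP p.contains : Int) := by positivity
  split_ifs with a b c e f g <;> first | rfl | omega
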